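-- pv_equiv track=rewrite | github.com/MinKyeom/KMK-DREAM | Programmers/lv3/110 옮기기.py | solution
-- ===== SOURCE A (Python) =====
-- def solution(s):
--     answer = []
--     for string in s:
--         count, idx, stack = 0, 0, ""
--         while idx < len(string):            # 110 찾기
--             if string[idx] == "0" and stack[-2:] == "11":
--                 stack = stack[:-2]
--                 count += 1
--             else:
--                 stack += string[idx]
--             idx += 1
--
--         idx = stack.find("111")             # 110이 빠진 string에서 111 찾기
--         if idx == -1:                       # 0뒤에 110 반복해 붙이기
--             idx = stack.rfind('0')
--             stack = stack[:idx+1]+"110"*count+stack[idx+1:]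
--         else:                               # 111앞에 110 반복해 붙이기
--             stack = stack[:idx]+"110"*count+stack[idx:]
--         answer.append(stack)
--     return answer
-- ===== SOURCE B (Python) =====
-- def _convert(string):
--     # Run-length automaton: instead of building a character stack and scanning it
--     # afterwards with find/rfind, keep only the reduced prefix w (which never ends
--     # in '1'), the length of the trailing run of '1's, and incrementally track the
--     # first '111' position and last '0' position; assemble the answer in O(1) splices.
--     w = []            # reduced prefix; never ends with '1'
--     ones = 0          # length of the trailing run of '1's
--     count = 0         # number of "110" patterns removed
--     first111 = -1     # index of the first "111" inside w, or -1
--     lastzero = -1     # index of the last '0' inside w, or -1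
--     for ch in string:
--         if ch == '1':
--             ones += 1
--         elif ch == '0' and ones >= 2:
--             ones -= 2
--             count += 1
--         else:
--             if first111 < 0 and ones >= 3:
--                 first111 = len(w)
--             if ch == '0':
--                 lastzero = len(w) + ones
--             w.extend('1' * ones)
--             w.append(ch)
--             ones = 0
--     if first111 >= 0:
--         p = first111
--     elif ones >= 3:
--         p = len(w)
--     else:
--         p = lastzero + 1
--     body = ''.join(w) + '1' * ones
--     return body[:p] + '110' * count + body[p:]
--
--
-- def solution(s):
--     return [_convert(string) for string in s]
-- ===== Notes on version B (the rewrite author's own statement) =====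
-- stated objective: alternative
-- what changed: B replaces A's explicit character stack plus post-hoc find('111')/rfind('0') scans by a run-length automaton: it keeps only the reduced prefix w (which provably never ends in '1'), the length of the trailing run of '1's as a counter, and tracks the first-'111' and last-'0' positions incrementally during the single pass, so the removal test is an integer comparison and no scan of the reduced string is ever made.
import Mathlib
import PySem

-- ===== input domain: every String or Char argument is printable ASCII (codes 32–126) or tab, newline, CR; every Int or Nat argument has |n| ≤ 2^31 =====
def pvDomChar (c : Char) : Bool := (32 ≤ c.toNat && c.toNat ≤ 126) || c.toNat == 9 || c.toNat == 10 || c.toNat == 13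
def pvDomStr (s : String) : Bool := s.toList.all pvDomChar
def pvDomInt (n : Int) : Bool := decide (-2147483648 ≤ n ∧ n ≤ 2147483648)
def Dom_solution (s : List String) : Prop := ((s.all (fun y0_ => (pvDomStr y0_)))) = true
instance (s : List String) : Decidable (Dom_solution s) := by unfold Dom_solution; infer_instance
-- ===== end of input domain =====

-- B replaces A's character stack + post-hoc find('111')/rfind('0') scans by a single-pass
-- run-length automaton (reduced prefix w, trailing-ones counter, incrementally tracked
-- first-'111' and last-'0' positions); objective: alternative.

-- ===== PORT A =====
-- state (count, stack); one step of A's while loop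
def solStepA (st : Int × List Char) (ch : Char) : Int × List Char :=
  if ch = '0' ∧ PySem.List.slice st.2 (some (-2)) none = ['1', '1'] then
    (st.1 + 1, PySem.List.slice st.2 none (some (-2)))
  else
    (st.1, st.2 ++ [ch])

-- A's body for one string
def solOne (str : String) : String :=
  let r := str.toList.foldl solStepA (0, [])
  let count := r.1
  let stack := r.2
  let idx := PySem.Chars.find stack ['1', '1', '1']
  if idx = -1 then
    let idx2 := PySem.Chars.rfind stack ['0']
    String.ofList (PySem.List.slice stack none (some (idx2 + 1)) ++
      PySem.List.pyRepeat ['1', '1', '0'] count ++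
      PySem.List.slice stack (some (idx2 + 1)) none)
  else
    String.ofList (PySem.List.slice stack none (some idx) ++
      PySem.List.pyRepeat ['1', '1', '0'] count ++
      PySem.List.slice stack (some idx) none)

def solution (s : List String) : List String :=
  s.foldl (fun acc st => acc ++ [solOne st]) []

-- ===== PORT B =====
-- B's loop state: reduced prefix w (never ends in '1'), trailing-ones counter,
-- removal counter, first '111' position in w (or -1), last '0' position in w (or -1)
structure BState where
  w : List Char
  ones : Int
  count : Int
  first111 : Int
  lastzero : Int
  deriving Repr, DecidableEq

-- one step of B's for loop
def altStep (st : BState) (ch : Char) : BState :=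
  if ch = '1' then { st with ones := st.ones + 1 }
  else if ch = '0' ∧ 2 ≤ st.ones then { st with ones := st.ones - 2, count := st.count + 1 }
  else
    { w := st.w ++ PySem.List.pyRepeat ['1'] st.ones ++ [ch],
      ones := 0,
      count := st.count,
      first111 := if st.first111 < 0 ∧ 3 ≤ st.ones then (st.w.length : Int) else st.first111,
      lastzero := if ch = '0' then (st.w.length : Int) + st.ones else st.lastzero }

-- B's _convert for one string
def altOne (str : String) : String :=
  let st := str.toList.foldl altStep ⟨[], 0, 0, -1, -1⟩
  let p : Int :=
    if 0 ≤ st.first111 then st.first111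
    else if 3 ≤ st.ones then (st.w.length : Int)
    else st.lastzero + 1
  let body := st.w ++ PySem.List.pyRepeat ['1'] st.ones
  String.ofList (PySem.List.slice body none (some p) ++
    PySem.List.pyRepeat ['1', '1', '0'] st.count ++
    PySem.List.slice body (some p) none)

def solution_alt (s : List String) : List String := s.map altOne

-- ===== PRECONDITION & SPEC =====
def Spec_solution (s : List String) (out : List String) : Prop := out = solution_alt s
instance (s : List String) (out : List String) : Decidable (Spec_solution s out) := by unfold Spec_solution; infer_instance

-- ===== CLAIM (what is proved, stated in full; the proofs are below) =====
def Claim_equal_solution : Prop := ∀ (s : List String), Dom_solution s → Spec_solution s (solution s)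

-- ===== LEMMAS AND PROOFS =====

-- first index of "111" in a char list (specification device for B's first111 field)
def find111 : List Char → Option Nat
  | a :: b :: c :: rest =>
      if a = '1' ∧ b = '1' ∧ c = '1' then some 0
      else (find111 (b :: c :: rest)).map (· + 1)
  | _ => none

lemma find111_append (w v : List Char) (hw : ∀ c, w.getLast? = some c → c ≠ '1') :
    find111 (w ++ v) = (find111 w).or ((find111 v).map (· + w.length)) := by
  induction w generalizing v with
  | nil => simp [find111]
  | cons a w' ih =>
    match w', hw with
    | [], hw =>
      have ha : a ≠ '1' := hw a (by simp)
      match v with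
      | [] => simp [find111]
      | [b] => simp [find111]
      | b :: c :: r =>
        rw [show ([a] ++ (b :: c :: r)) = a :: b :: c :: r from rfl]
        rw [show find111 (a :: b :: c :: r) =
          (if a = '1' ∧ b = '1' ∧ c = '1' then some 0
            else (find111 (b :: c :: r)).map (· + 1)) from rfl]
        rw [if_neg (by tauto)]
        simp [find111]
    | [b], hw =>
      have hb : b ≠ '1' := hw b (by simp)
      match v with
      | [] => simp [find111]
      | c :: r =>
        rw [show ([a, b] ++ (c :: r)) = a :: b :: c :: r from rfl]
        rw [show find111 (a :: b :: c :: r) =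
          (if a = '1' ∧ b = '1' ∧ c = '1' then some 0
            else (find111 (b :: c :: r)).map (· + 1)) from rfl]
        rw [if_neg (by tauto)]
        have := ih (hw := by intro x hx; exact hw x hx) (v := c :: r)
        rw [show ([b] ++ (c :: r)) = b :: c :: r from rfl] at this
        rw [this]
        rw [show find111 [a, b] = none from rfl, show find111 [b] = none from rfl]
        cases find111 (c :: r) <;> simp
    | b :: c :: w'', hw =>
      have hw' : ∀ x, (b :: c :: w'').getLast? = some x → x ≠ '1' := by
        intro x hx; exact hw x (by simpa using hx)
      rw [show ((a :: b :: c :: w'') ++ v) = a :: b :: c :: (w'' ++ v) from rfl]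
      rw [show find111 (a :: b :: c :: (w'' ++ v)) =
        (if a = '1' ∧ b = '1' ∧ c = '1' then some 0
          else (find111 (b :: c :: (w'' ++ v))).map (· + 1)) from rfl]
      rw [show find111 (a :: b :: c :: w'') =
        (if a = '1' ∧ b = '1' ∧ c = '1' then some 0
          else (find111 (b :: c :: w'')).map (· + 1)) from rfl]
      by_cases h : a = '1' ∧ b = '1' ∧ c = '1'
      · rw [if_pos h, if_pos h]; rfl
      · rw [if_neg h, if_neg h]
        have := ih (hw := hw') (v := v)
        rw [show ((b :: c :: w'') ++ v) = b :: c :: (w'' ++ v) from rfl] at this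
        rw [this]
        cases find111 (b :: c :: w'') with
        | some i => simp
        | none =>
          cases find111 v with
          | none => simp
          | some j => simp; omega

lemma find111_rep (k : Nat) :
    find111 (List.replicate k '1') = if 3 ≤ k then some 0 else none := by
  match k with
  | 0 => simp [find111]
  | 1 => simp [List.replicate, find111]
  | 2 => simp [List.replicate, find111]
  | (n+3) =>
    rw [show List.replicate (n+3) '1' = '1'::'1'::'1'::List.replicate n '1' from rfl]
    simp [find111]

lemma find111_repSnoc (k : Nat) (c : Char) (hc : c ≠ '1') :
    find111 (List.replicate k '1' ++ [c]) = if 3 ≤ k then some 0 else none := by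
  match k with
  | 0 => simp [find111]
  | 1 => simp [List.replicate, find111]
  | 2 => simp [List.replicate, find111, hc]
  | (n+3) =>
    rw [show List.replicate (n+3) '1' ++ [c] = '1'::'1'::'1'::(List.replicate n '1' ++ [c]) from rfl]
    simp [find111]

-- find("111") equals the recursive scan find111
lemma find_go_triple (s : List Char) : ∀ (k : Nat),
    PySem.Chars.find.go ['1', '1', '1'] s k =
      (find111 s).elim (-1) (fun i => ((k + i : Nat) : Int)) := by
  induction s with
  | nil => intro k; simp [PySem.Chars.find.go, find111, List.isEmpty]
  | cons a t ih =>
    intro k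
    match t, ih with
    | [], _ =>
      simp [PySem.Chars.find.go, find111, List.isPrefixOf, List.isEmpty]
    | [b], _ =>
      simp [PySem.Chars.find.go, find111, List.isPrefixOf, List.isEmpty]
    | b :: c :: r, ih =>
      rw [show find111 (a :: b :: c :: r) =
        (if a = '1' ∧ b = '1' ∧ c = '1' then some 0
          else (find111 (b :: c :: r)).map (· + 1)) from rfl]
      by_cases h : a = '1' ∧ b = '1' ∧ c = '1'
      · obtain ⟨ha, hb, hc⟩ := h
        subst ha hb hc
        simp [PySem.Chars.find.go, List.isPrefixOf]
      · rw [if_neg h]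
        have hpre : (['1', '1', '1'].isPrefixOf (a :: b :: c :: r)) = false := by
          simp [List.isPrefixOf]
          intro ha hb hcc
          exact h ⟨ha.symm, hb.symm, hcc.symm⟩
        rw [show PySem.Chars.find.go ['1', '1', '1'] (a :: b :: c :: r) k =
          (if ['1', '1', '1'].isPrefixOf (a :: b :: c :: r) then (k : Int)
            else PySem.Chars.find.go ['1', '1', '1'] (b :: c :: r) (k + 1)) from rfl]
        rw [hpre]
        simp only [Bool.false_eq_true, if_false]
        rw [ih (k + 1)]
        cases hft : find111 (b :: c :: r) with
        | none => simp
        | some i => simp; omega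

lemma find_triple (s : List Char) :
    PySem.Chars.find s ['1', '1', '1'] = (find111 s).elim (-1) (fun i => (i : Int)) := by
  rw [show PySem.Chars.find s ['1', '1', '1'] = PySem.Chars.find.go ['1', '1', '1'] s 0 from rfl,
    find_go_triple s 0]
  cases find111 s <;> simp

-- rfind('0') over a snoc
lemma rfind_go_snoc (t : List Char) (c : Char) : ∀ (k : Nat), k < t.length →
    PySem.Chars.rfind.go (t ++ [c]) ['0'] k = PySem.Chars.rfind.go t ['0'] k := by
  intro k
  induction k with
  | zero =>
    intro hk
    have : (['0'].isPrefixOf (t ++ [c])) = (['0'].isPrefixOf t) := by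
      match t, hk with
      | a :: r, _ => simp [List.isPrefixOf]
    simp [PySem.Chars.rfind.go, this]
  | succ j ihj =>
    intro hk
    have hdrop : (t ++ [c]).drop (j + 1) = t.drop (j + 1) ++ [c] := by
      rw [List.drop_append_of_le_length (by omega)]
    have : (['0'].isPrefixOf ((t ++ [c]).drop (j + 1))) = (['0'].isPrefixOf (t.drop (j + 1))) := by
      rw [hdrop]
      have : ∃ a r, t.drop (j + 1) = a :: r := by
        have : j + 1 < t.length := hk
        cases hd : t.drop (j + 1) with
        | nil => exfalso; have := congrArg List.length hd; simp at this; omega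
        | cons a r => exact ⟨a, r, rfl⟩
      obtain ⟨a, r, hd⟩ := this
      rw [hd]; simp [List.isPrefixOf]
    simp only [PySem.Chars.rfind.go, this]
    rw [ihj (by omega)]

lemma rfind_snoc (t : List Char) (c : Char) :
    PySem.Chars.rfind (t ++ [c]) ['0'] =
      if c = '0' then (t.length : Int) else PySem.Chars.rfind t ['0'] := by
  rw [show PySem.Chars.rfind (t ++ [c]) ['0'] =
    PySem.Chars.rfind.go (t ++ [c]) ['0'] (t ++ [c]).length from rfl]
  have hlen : (t ++ [c]).length = t.length + 1 := by simp
  rw [hlen]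
  have hdrop : (t ++ [c]).drop (t.length + 1) = [] := by
    apply List.drop_eq_nil_of_le; simp
  rw [show PySem.Chars.rfind.go (t ++ [c]) ['0'] (t.length + 1) =
    (if ['0'].isPrefixOf ((t ++ [c]).drop (t.length + 1)) then ((t.length + 1 : Nat) : Int)
      else PySem.Chars.rfind.go (t ++ [c]) ['0'] t.length) from rfl]
  rw [hdrop]
  simp only [List.isPrefixOf, Bool.false_eq_true, if_false]
  have hdrop2 : (t ++ [c]).drop t.length = [c] := by
    rw [List.drop_append_of_le_length (by omega)]; simp
  cases ht : t.length with
  | zero =>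
    have htn : t = [] := by cases t with
      | nil => rfl
      | cons x xs => simp at ht
    subst htn
    by_cases hc : c = '0'
    · subst hc
      simp [PySem.Chars.rfind.go, List.isPrefixOf]
    · rw [if_neg hc]
      have h2 : (['0'].isPrefixOf ([c] : List Char)) = false := by
        simp [List.isPrefixOf]
        exact fun h => hc h.symm
      rw [show PySem.Chars.rfind.go ([] ++ [c] : List Char) ['0'] 0 =
        (if ['0'].isPrefixOf ([] ++ [c] : List Char) then (0 : Int) else -1) from rfl]
      simp only [List.nil_append]
      simp only [h2, Bool.false_eq_true, if_false]
      simp [PySem.Chars.rfind, PySem.Chars.rfind.go, List.isPrefixOf]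
  | succ j =>
    rw [show PySem.Chars.rfind.go (t ++ [c]) ['0'] (j + 1) =
      (if ['0'].isPrefixOf ((t ++ [c]).drop (j + 1)) then ((j + 1 : Nat) : Int)
        else PySem.Chars.rfind.go (t ++ [c]) ['0'] j) from rfl]
    have hj1 : j + 1 = t.length := ht.symm
    rw [hj1, hdrop2]
    by_cases hc : c = '0'
    · subst hc; simp [List.isPrefixOf]
    · have : (['0'].isPrefixOf [c]) = false := by
        simp [List.isPrefixOf]
        exact fun h => hc h.symm
      rw [this]
      simp only [Bool.false_eq_true, if_false]
      rw [rfind_go_snoc t c j (by omega)]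
      rw [show PySem.Chars.rfind t ['0'] = PySem.Chars.rfind.go t ['0'] t.length from rfl, ← hj1]
      rw [show PySem.Chars.rfind.go t ['0'] (j + 1) =
        (if ['0'].isPrefixOf (t.drop (j + 1)) then ((j + 1 : Nat) : Int)
          else PySem.Chars.rfind.go t ['0'] j) from rfl]
      have : t.drop (j + 1) = [] := by apply List.drop_eq_nil_of_le; omega
      rw [this]
      simp [List.isPrefixOf]
      intro h
      exact absurd h hc

lemma rfind_append_rep (w : List Char) (k : Nat) :
    PySem.Chars.rfind (w ++ List.replicate k '1') ['0'] = PySem.Chars.rfind w ['0'] := by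
  induction k with
  | zero => simp
  | succ j ih =>
    rw [List.replicate_succ' , ← List.append_assoc, rfind_snoc]
    simp [ih]

-- the last-two-chars test of A under the invariant decomposition
lemma lastTwo_rep (w : List Char) (k : Nat) (hw : ∀ c, w.getLast? = some c → c ≠ '1') :
    ((w ++ List.replicate k '1').drop ((w ++ List.replicate k '1').length - 2) = ['1', '1']) ↔ 2 ≤ k := by
  constructor
  · intro h
    by_contra hk
    have hk2 : k ≤ 1 := by omega
    interval_cases k
    · simp only [List.replicate_zero, List.append_nil] at h
      have h2 := congrArg List.getLast? h
      rw [List.getLast?_drop] at h2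
      by_cases hc : w.length ≤ w.length - 2
      · rw [if_pos hc] at h2; simp at h2
      · rw [if_neg hc] at h2
        simp at h2
        exact hw '1' h2 rfl
    · cases w with
      | nil => simp at h
      | cons a t =>
        have h2 := congrArg (fun l => l[0]?) h
        simp only [List.getElem?_drop] at h2
        have hlen : ((a :: t) ++ List.replicate 1 '1').length = t.length + 2 := by simp
        rw [hlen] at h2
        simp only [Nat.add_sub_cancel, Nat.add_zero] at h2
        rw [List.getElem?_append_left (by simp)] at h2
        have : (a :: t).getLast? = some '1' := by
          rw [List.getLast?_eq_getElem?]
          simpa using h2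
        exact hw '1' this rfl
  · intro hk
    have hL : (w ++ List.replicate k '1').length - 2 = w.length + (k - 2) := by
      simp; omega
    rw [hL, List.drop_append]
    have h1 : List.drop (w.length + (k - 2)) w = [] := List.drop_eq_nil_of_le (by omega)
    rw [h1, List.drop_replicate]
    have : k - (w.length + (k - 2) - w.length) = 2 := by omega
    rw [this]
    rfl

-- the coupling invariant between A's loop state and B's
def StInv (a : Int × List Char) (st : BState) : Prop :=
  ∃ k : Nat,
    st.ones = (k : Int) ∧
    a.2 = st.w ++ List.replicate k '1' ∧
    a.1 = st.count ∧
    (∀ c, st.w.getLast? = some c → c ≠ '1') ∧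
    st.first111 = (find111 st.w).elim (-1) (fun i => (i : Int)) ∧
    st.lastzero = PySem.Chars.rfind st.w ['0']

lemma step_inv (a : Int × List Char) (st : BState) (ch : Char) (h : StInv a st) :
    StInv (solStepA a ch) (altStep st ch) := by
  obtain ⟨k, hones, hstack, hcount, hlast, hf, hz⟩ := h
  by_cases hch1 : ch = '1'
  · subst hch1
    have hA : solStepA a '1' = (a.1, a.2 ++ ['1']) := by
      unfold solStepA
      rw [if_neg (by rintro ⟨hh, -⟩; exact absurd hh (by decide))]
    have hB : altStep st '1' = { st with ones := st.ones + 1 } := by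
      unfold altStep
      rw [if_pos rfl]
    rw [hA, hB]
    refine ⟨k + 1, ?_, ?_, ?_, ?_, ?_, ?_⟩
    · simp [hones]
    · simp only [hstack, List.replicate_succ', ← List.append_assoc]
    · simpa using hcount
    · simpa using hlast
    · simpa using hf
    · simpa using hz
  · by_cases hrem : ch = '0' ∧ 2 ≤ st.ones
    · obtain ⟨hch0, h2⟩ := hrem
      have hk2 : 2 ≤ k := by rw [hones] at h2; exact_mod_cast h2
      have hcond : PySem.List.slice a.2 (some (-2)) none = ['1', '1'] := by
        rw [PySem.List.slice_from_neg_ofNat a.2 2 (by norm_num), hstack]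
        exact (lastTwo_rep st.w k hlast).2 hk2
      have hA : solStepA a ch = (a.1 + 1, PySem.List.slice a.2 none (some (-2))) := by
        unfold solStepA
        rw [if_pos ⟨hch0, hcond⟩]
      have hB : altStep st ch =
          { st with ones := st.ones - 2, count := st.count + 1 } := by
        unfold altStep
        rw [if_neg hch1, if_pos ⟨hch0, h2⟩]
      rw [hA, hB]
      refine ⟨k - 2, ?_, ?_, ?_, ?_, ?_, ?_⟩
      · simp [hones]; omega
      · simp only []
        rw [PySem.List.slice_to_neg_ofNat a.2 2 (by norm_num), hstack]
        have hL : (st.w ++ List.replicate k '1').length - 2 = st.w.length + (k - 2) := by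
          simp; omega
        rw [hL, List.take_append]
        rw [List.take_of_length_le (by omega), List.take_replicate]
        congr 2
        omega
      · simp [hcount]
      · simpa using hlast
      · simpa using hf
      · simpa using hz
    · have hcond : ¬ (ch = '0' ∧ PySem.List.slice a.2 (some (-2)) none = ['1', '1']) := by
        rintro ⟨hch0, hsl⟩
        rw [PySem.List.slice_from_neg_ofNat a.2 2 (by norm_num), hstack] at hsl
        have hk2 := (lastTwo_rep st.w k hlast).1 hsl
        exact hrem ⟨hch0, by rw [hones]; exact_mod_cast hk2⟩
      have hA : solStepA a ch = (a.1, a.2 ++ [ch]) := by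
        unfold solStepA
        rw [if_neg hcond]
      have hB : altStep st ch =
          { w := st.w ++ PySem.List.pyRepeat ['1'] st.ones ++ [ch],
            ones := 0,
            count := st.count,
            first111 := if st.first111 < 0 ∧ 3 ≤ st.ones then (st.w.length : Int) else st.first111,
            lastzero := if ch = '0' then (st.w.length : Int) + st.ones else st.lastzero } := by
        unfold altStep
        rw [if_neg hch1, if_neg hrem]
      rw [hA, hB]
      have hwrep : PySem.List.pyRepeat ['1'] st.ones = List.replicate k '1' := by
        rw [hones, PySem.List.pyRepeat_singleton]
        simp
      refine ⟨0, ?_, ?_, ?_, ?_, ?_, ?_⟩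
      · simp
      · simp only [hwrep, List.replicate_zero, List.append_nil]
        rw [hstack, List.append_assoc]
      · simpa using hcount
      · intro c hc
        simp only [hwrep] at hc
        rw [List.getLast?_concat] at hc
        cases hc
        exact hch1
      · simp only [hwrep]
        rw [List.append_assoc, find111_append st.w (List.replicate k '1' ++ [ch]) hlast,
          find111_repSnoc k ch hch1]
        cases hfw : find111 st.w with
        | some i =>
          rw [if_neg (by rw [hf, hfw]; simp)]
          rw [hf, hfw]
          rfl
        | none =>
          by_cases hk3 : 3 ≤ k
          · rw [if_pos ⟨by rw [hf, hfw]; simp, by rw [hones]; exact_mod_cast hk3⟩]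
            rw [if_pos hk3]
            simp
          · rw [if_neg ?_, if_neg hk3]
            · rw [hf, hfw]; rfl
            · rintro ⟨-, h3⟩
              rw [hones] at h3
              exact hk3 (by exact_mod_cast h3)
      · simp only [hwrep]
        rw [rfind_snoc]
        by_cases hch0 : ch = '0'
        · rw [if_pos hch0, if_pos hch0, hones]
          simp
        · rw [if_neg hch0, if_neg hch0, rfind_append_rep]
          exact hz

lemma foldl_inv (l : List Char) (a : Int × List Char) (st : BState) (h : StInv a st) :
    StInv (l.foldl solStepA a) (l.foldl altStep st) := by
  induction l generalizing a st with
  | nil => exact h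
  | cons c t ih => exact ih _ _ (step_inv a st c h)

lemma oneEq (str : String) : solOne str = altOne str := by
  have hinv : StInv (str.toList.foldl solStepA (0, ([] : List Char)))
      (str.toList.foldl altStep ⟨[], 0, 0, -1, -1⟩) := by
    apply foldl_inv
    exact ⟨0, by simp, by simp, rfl, by intro c hc; simp at hc, rfl, by decide⟩
  obtain ⟨k, hones, hstack, hcount, hlast, hf, hz⟩ := hinv
  unfold solOne altOne
  dsimp only
  set sA := str.toList.foldl solStepA (0, ([] : List Char)) with hsA
  set sB := str.toList.foldl altStep (⟨[], 0, 0, -1, -1⟩ : BState) with hsB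
  have hbody : sB.w ++ PySem.List.pyRepeat ['1'] sB.ones = sB.w ++ List.replicate k '1' := by
    rw [hones, PySem.List.pyRepeat_singleton]
    simp
  rw [hbody, find_triple, hstack, hcount, hz,
    find111_append sB.w (List.replicate k '1') hlast, find111_rep k, hf]
  cases hfw : find111 sB.w with
  | some i =>
    simp only [Option.some_or, Option.elim_some]
    rw [if_neg (by omega), if_pos (by omega)]
  | none =>
    simp only [Option.none_or, Option.elim_none]
    by_cases hk3 : 3 ≤ k
    · rw [if_pos hk3]
      simp only [Option.map_some, Option.elim_some]
      rw [if_neg (by omega), if_neg (by omega), if_pos (by rw [hones]; exact_mod_cast hk3)]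
      norm_num
    · rw [if_neg hk3]
      simp only [Option.map_none, Option.elim_none]
      rw [rfind_append_rep]
      norm_num
      rw [hones, if_neg (show ¬(3:Int) ≤ (k:Int) by exact_mod_cast hk3)]

-- ===== VERDICT (by name: the statement is the Claim_ definition above) =====
theorem solution_spec : Claim_equal_solution := by
  intro s _
  unfold Spec_solution solution solution_alt
  rw [PySem.List.foldl_append_singleton_eq_map]
  simp only [List.nil_append]
  exact List.map_congr_left (fun x _ => oneEq x)
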